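-- pv_equiv track=rewrite | github.com/alexljenkins/bashon | src/bashon/cli.py | _split_global_flags
-- ===== SOURCE A (Python) =====
-- def _split_global_flags(argv: list[str]) -> tuple[bool, bool, list[str]]:
--     human = False
--     help_requested = False
--     index = 0
--     while index < len(argv):
--         token = argv[index]
--         if token == "--human":
--             human = True
--             index += 1
--             continue
--         if token == "--help":
--             help_requested = True
--             index += 1
--             continue
--         break
--     return human, help_requested, argv[index:]
-- ===== SOURCE B (Python) =====
-- def _split_global_flags(argv: list[str]) -> tuple[bool, bool, list[str]]:
--     # Recursive decomposition: solve the tail first, then merge the head flag on return.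
--     if argv and argv[0] == "--human":
--         _, help_requested, rest = _split_global_flags(argv[1:])
--         return True, help_requested, rest
--     if argv and argv[0] == "--help":
--         human, _, rest = _split_global_flags(argv[1:])
--         return human, True, rest
--     return False, False, argv
-- ===== Notes on version B (the rewrite author's own statement) =====
-- stated objective: alternative
-- what changed: Replaces A's forward iterative scan that threads two boolean accumulators through a while-loop with a structural recursion that solves the tail first and ORs the head's flag into the tail's answer on the way back out (accumulator-forward loop vs combine-on-return recursion).
import Mathlib
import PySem

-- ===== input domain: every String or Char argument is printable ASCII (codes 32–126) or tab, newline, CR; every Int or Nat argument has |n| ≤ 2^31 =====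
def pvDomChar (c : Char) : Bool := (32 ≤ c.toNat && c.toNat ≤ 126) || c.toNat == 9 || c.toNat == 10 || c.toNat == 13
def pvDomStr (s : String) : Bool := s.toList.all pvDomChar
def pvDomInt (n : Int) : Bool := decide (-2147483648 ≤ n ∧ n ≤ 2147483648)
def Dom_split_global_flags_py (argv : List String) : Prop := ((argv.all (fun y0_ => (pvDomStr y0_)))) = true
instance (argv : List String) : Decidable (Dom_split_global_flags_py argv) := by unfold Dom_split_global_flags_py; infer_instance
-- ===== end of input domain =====

-- B replaces A's forward while-loop threading two boolean accumulators with a structural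
-- recursion that solves the tail first and ORs the head's flag into the answer on return.

-- ===== PORT A =====
-- A's while-loop walks an index forward over leading flag tokens, setting the matching flag and
-- continuing; ported as structural recursion over the remaining suffix carrying the two flags.
def splitA_loop (rest : List String) (human help_requested : Bool) : Bool × Bool × List String :=
  match rest with
  | [] => (human, help_requested, [])
  | token :: tl =>
    if token = "--human" then splitA_loop tl true help_requested
    else if token = "--help" then splitA_loop tl human true
    else (human, help_requested, token :: tl)

def split_global_flags_py (argv : List String) : Bool × Bool × List String :=
  splitA_loop argv false false

-- ===== PORT B =====
-- B: recursion on argv; the tail's result is computed first, then the head flag is merged on return.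
def split_global_flags_py_alt (argv : List String) : Bool × Bool × List String :=
  match argv with
  | t :: tl =>
    if t = "--human" then
      let r := split_global_flags_py_alt tl
      (true, r.2.1, r.2.2)
    else if t = "--help" then
      let r := split_global_flags_py_alt tl
      (r.1, true, r.2.2)
    else (false, false, t :: tl)
  | [] => (false, false, [])

-- ===== PRECONDITION & SPEC =====
def Spec_split_global_flags_py (argv : List String) (out : Bool × Bool × List String) : Prop := out = split_global_flags_py_alt argv
instance (argv : List String) (out : Bool × Bool × List String) : Decidable (Spec_split_global_flags_py argv out) := by unfold Spec_split_global_flags_py; infer_instance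

-- ===== CLAIM =====
def Claim_equal_split_global_flags_py : Prop := ∀ (argv : List String), Dom_split_global_flags_py argv → Spec_split_global_flags_py argv (split_global_flags_py argv)

-- ===== LEMMAS AND PROOFS =====
-- A's accumulator-threading loop equals B's combine-on-return recursion with the initial
-- accumulators OR'd into the recursive result.
theorem splitA_loop_eq (l : List String) : ∀ (h hr : Bool),
    splitA_loop l h hr =
      (h || (split_global_flags_py_alt l).1,
       hr || (split_global_flags_py_alt l).2.1,
       (split_global_flags_py_alt l).2.2) := by
  induction l with
  | nil => intro h hr; simp [splitA_loop, split_global_flags_py_alt]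
  | cons t tl ih =>
    intro h hr
    by_cases hhu : t = "--human"
    · subst hhu
      simp [splitA_loop, split_global_flags_py_alt, ih]
    · by_cases hhe : t = "--help"
      · subst hhe
        simp [splitA_loop, split_global_flags_py_alt, hhu, ih]
      · simp [splitA_loop, split_global_flags_py_alt, hhu, hhe]

-- ===== VERDICT =====
theorem split_global_flags_py_spec : Claim_equal_split_global_flags_py := by
  intro argv _
  unfold Spec_split_global_flags_py split_global_flags_py
  simp [splitA_loop_eq]
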